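-- pv_equiv track=rewrite | github.com/moritzvii/bachelorproject | backend/app/pipelines/nli/pipeline/2-Hypothesen/strategy_hypotheses.py | enforce_title_limits
-- ===== SOURCE A (Python) =====
-- def enforce_title_limits(candidate: str) -> str:
--     candidate = candidate.strip()
--     if not candidate:
--         return ""
--     words = [word for word in candidate.split() if word]
--     limited_words: list[str] = []
--     current_len = 0
--     for word in words:
--         if len(limited_words) >= 3:
--             break
--         delimiter = 1 if limited_words else 0
--         if current_len + delimiter + len(word) > 25:
--             break
--         limited_words.append(word)
--         current_len += delimiter + len(word)
--     if limited_words: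
--         return " ".join(limited_words)
--     return candidate[:25].rstrip()
-- ===== SOURCE B (Python) =====
-- def enforce_title_limits(candidate: str) -> str:
--     candidate = candidate.strip()
--     if not candidate:
--         return ""
--     words = candidate.split()
--     for k in range(min(3, len(words)), 0, -1):
--         s = " ".join(words[:k])
--         if len(s) <= 25:
--             return s
--     return candidate[:25].rstrip()
-- ===== Notes on version B (the rewrite author's own statement) =====
-- stated objective: simpler
-- what changed: Replaces A's greedy word-by-word accumulator with running length and delimiter bookkeeping by directly testing the joined length of the at-most-3-word prefixes from longest to shortest and returning the first that fits in 25 chars.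
import Mathlib
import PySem

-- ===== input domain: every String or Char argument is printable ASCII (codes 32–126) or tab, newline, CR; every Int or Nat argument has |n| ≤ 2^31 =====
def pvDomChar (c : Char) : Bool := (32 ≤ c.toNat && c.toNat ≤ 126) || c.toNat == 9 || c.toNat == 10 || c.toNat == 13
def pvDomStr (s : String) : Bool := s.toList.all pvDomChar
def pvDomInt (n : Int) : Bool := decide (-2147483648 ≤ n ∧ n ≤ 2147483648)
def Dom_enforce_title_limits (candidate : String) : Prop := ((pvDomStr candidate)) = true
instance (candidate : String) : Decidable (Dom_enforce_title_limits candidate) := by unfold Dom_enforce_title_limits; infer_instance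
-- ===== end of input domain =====

-- B replaces A's greedy accumulator (running length + delimiter bookkeeping) by testing the joined
-- length of each at-most-3-word prefix from longest to shortest; objective: simpler.

-- ===== PORT A =====
-- the 'for word in words: … break' loop of A, state = (limited_words, current_len)
def pvALoop : List String → List String → Int → List String
  | [], acc, _ => acc
  | w :: ws, acc, clen =>
    if 3 ≤ acc.length then acc
    else
      let delim : Int := if acc.isEmpty then 0 else 1
      if clen + delim + PySem.Str.len w > 25 then acc
      else pvALoop ws (acc ++ [w]) (clen + delim + PySem.Str.len w)

def enforce_title_limits (candidate : String) : String :=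
  let c := PySem.Str.strip candidate
  if c = "" then ""
  else
    let words := (PySem.Str.split₀ c).filter (fun w => w ≠ "")
    let limited := pvALoop words [] 0
    if limited ≠ [] then PySem.Str.join " " limited
    else PySem.Str.rstrip (PySem.Str.slice c none (some 25))

-- ===== PORT B =====
-- B's 'for k in range(min(3, len(words)), 0, -1)' loop, returning the first fitting join
def pvBLoop (words : List String) : Nat → Option String
  | 0 => none
  | Nat.succ k =>
    let s := PySem.Str.join " " (words.take (k + 1))
    if PySem.Str.len s ≤ 25 then some s else pvBLoop words k

def enforce_title_limits_alt (candidate : String) : String :=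
  let c := PySem.Str.strip candidate
  if c = "" then ""
  else
    let words := PySem.Str.split₀ c
    match pvBLoop words (min 3 words.length) with
    | some s => s
    | none => PySem.Str.rstrip (PySem.Str.slice c none (some 25))

-- ===== PRECONDITION & SPEC =====
def Spec_enforce_title_limits (candidate : String) (out : String) : Prop := out = enforce_title_limits_alt candidate
instance (candidate : String) (out : String) : Decidable (Spec_enforce_title_limits candidate out) := by unfold Spec_enforce_title_limits; infer_instance

-- ===== CLAIM (what is proved, stated in full; the proofs are below) =====
def Claim_equal_enforce_title_limits : Prop := ∀ (candidate : String), Dom_enforce_title_limits candidate → Spec_enforce_title_limits candidate (enforce_title_limits candidate)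

-- ===== LEMMAS AND PROOFS =====

def pvJLen (l : List String) : Nat := (PySem.Chars.join [' '] (l.map String.toList)).length
theorem pvLen_join (l : List String) : PySem.Str.len (PySem.Str.join " " l) = (pvJLen l : Int) := by
  rw [PySem.Str.len_eq, PySem.Str.toList_join]; rfl
theorem pvJoin_append_singleton (d y : List Char) (xs : List (List Char)) (h : xs ≠ []) :
    PySem.Chars.join d (xs ++ [y]) = PySem.Chars.join d xs ++ d ++ y := by
  induction xs with
  | nil => exact absurd rfl h
  | cons a as ih =>
    cases as with
    | nil => simp [PySem.Chars.join_singleton, PySem.Chars.join_cons_cons]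
    | cons b bs =>
      rw [List.cons_append, List.cons_append, PySem.Chars.join_cons_cons,
        ← List.cons_append, ih (by simp), PySem.Chars.join_cons_cons]
      simp
theorem pvJLen_succ (ws : List String) (j : Nat) (hj : j < ws.length) :
    pvJLen (ws.take (j + 1)) =
      pvJLen (ws.take j) + (if j = 0 then 0 else 1) + (ws[j].toList.length) := by
  have ht : ws.take (j + 1) = ws.take j ++ [ws[j]] := by
    rw [List.take_add_one]; simp [List.getElem?_eq_getElem hj]
  by_cases h0 : j = 0
  · subst h0
    simp [ht, pvJLen, PySem.Chars.join_singleton, PySem.Chars.join_nil]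
  · have hne : (ws.take j).map String.toList ≠ [] := by
      intro h
      rcases List.take_eq_nil_iff.mp (List.map_eq_nil_iff.mp h) with h' | h'
      · exact h0 h'
      · rw [h'] at hj; simp at hj
    rw [pvJLen, ht, List.map_append, List.map_singleton]
    rw [pvJoin_append_singleton _ _ _ hne]
    simp [pvJLen, h0]
    omega
theorem pvJLen_take_mono (ws : List String) {j k : Nat} (hjk : j ≤ k) (hk : k ≤ ws.length) :
    pvJLen (ws.take j) ≤ pvJLen (ws.take k) := by
  induction k with
  | zero => have : j = 0 := by omega
            subst this; exact le_refl _
  | succ m ih =>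
    rcases Nat.lt_or_ge j (m+1) with h | h
    · have := ih (by omega) (by omega)
      have hs := pvJLen_succ ws m (by omega)
      omega
    · have : j = m + 1 := by omega
      subst this; exact le_refl _

-- the largest k ≤ min 3 |ws| whose joined take-k prefix fits in 25 characters (0 if none)
def pvF (ws : List String) : Nat := Nat.findGreatest (fun k => pvJLen (ws.take k) ≤ 25) (min 3 ws.length)

theorem pvBLoop_eq (ws : List String) :
    ∀ k, k ≤ ws.length →
      pvBLoop ws k =
        if Nat.findGreatest (fun j => pvJLen (ws.take j) ≤ 25) k = 0 then none
        else some (PySem.Str.join " " (ws.take (Nat.findGreatest (fun j => pvJLen (ws.take j) ≤ 25) k))) := by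
  intro k
  induction k with
  | zero => intro _; simp [pvBLoop]
  | succ m ih =>
    intro hk
    rw [pvBLoop, Nat.findGreatest_succ]
    have hlen : PySem.Str.len (PySem.Str.join " " (ws.take (m+1))) ≤ 25 ↔ pvJLen (ws.take (m+1)) ≤ 25 := by
      rw [pvLen_join]; exact_mod_cast Iff.rfl
    by_cases hp : pvJLen (ws.take (m+1)) ≤ 25
    · simp [hp]
      intro hcontra
      rw [pvJLen, List.map_take] at hp
      omega
    · have hq : ¬ PySem.Str.len (PySem.Str.join " " (ws.take (m+1))) ≤ 25 := fun h => hp (hlen.mp h)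
      simp only [hq, if_false, hp]
      exact ih (by omega)
theorem pvJLen_nil : pvJLen [] = 0 := by simp [pvJLen, PySem.Chars.join_nil]

theorem pvF_le (ws : List String) : pvF ws ≤ min 3 ws.length := Nat.findGreatest_le _

theorem pvF_spec (ws : List String) : pvJLen (ws.take (pvF ws)) ≤ 25 := by
  have h0 : pvJLen (ws.take 0) ≤ 25 := by rw [List.take_zero, pvJLen_nil]; omega
  exact Nat.findGreatest_spec (P := fun k => pvJLen (ws.take k) ≤ 25) (Nat.zero_le _) h0

theorem pvALoop_eq (ws : List String) :
    ∀ n j, ws.length - j = n → j ≤ 3 → j ≤ pvF ws →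
      pvALoop (ws.drop j) (ws.take j) (pvJLen (ws.take j) : Int) = ws.take (pvF ws) := by
  intro n
  induction n with
  | zero =>
    intro j hn _ hjF
    have hlen : ws.length ≤ j := by omega
    have hFj : pvF ws = j := le_antisymm (le_trans (pvF_le ws) (by omega)) hjF
    rw [List.drop_eq_nil_of_le hlen, pvALoop, hFj]
  | succ n ih =>
    intro j hn hj3 hjF
    have hjlt : j < ws.length := by omega
    have hFle : pvF ws ≤ min 3 ws.length := pvF_le ws
    rw [List.drop_eq_getElem_cons hjlt]
    rw [pvALoop]
    have hlt : (ws.take j).length = j := by simp [List.length_take]; omega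
    by_cases h3 : 3 ≤ j
    · have hj : j = 3 := by omega
      have hFj : pvF ws = j := le_antisymm (by omega) hjF
      rw [if_pos (by omega), hFj]
    · rw [if_neg (by omega)]
      have hdelim : (if (ws.take j).isEmpty then (0:Int) else 1) = if j = 0 then 0 else 1 := by
        by_cases h0 : j = 0
        · simp [h0]
        · have : ws.take j ≠ [] := by
            intro h
            rcases List.take_eq_nil_iff.mp h with h' | h'
            · exact h0 h'
            · rw [h'] at hjlt; simp at hjlt
          simp [h0, List.isEmpty_iff, this]
      have hkey : (pvJLen (ws.take j) : Int) + (if (ws.take j).isEmpty then (0:Int) else 1)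
          + PySem.Str.len ws[j] = (pvJLen (ws.take (j+1)) : Int) := by
        rw [hdelim, PySem.Str.len_eq, pvJLen_succ ws j hjlt]
        by_cases h0 : j = 0
        · simp only [h0, if_true]
          push_cast; ring
        · simp only [h0, if_false]
          push_cast; ring
      simp only [hkey]
      by_cases hfit : pvJLen (ws.take (j+1)) ≤ 25
      · rw [if_neg (by exact_mod_cast not_lt.mpr (by exact_mod_cast hfit))]
        have ht : ws.take j ++ [ws[j]] = ws.take (j+1) := by
          rw [List.take_add_one]; simp [List.getElem?_eq_getElem hjlt]
        rw [ht]
        exact ih (j+1) (by omega) (by omega)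
          (Nat.le_findGreatest (by omega) hfit)
      · have hgt : (25:Int) < (pvJLen (ws.take (j+1)) : Int) := by exact_mod_cast Nat.lt_of_not_le hfit
        rw [if_pos (by omega)]
        have hFj : pvF ws = j := by
          refine le_antisymm ?_ hjF
          by_contra hc
          have hj1F : j + 1 ≤ pvF ws := by omega
          have := pvJLen_take_mono ws hj1F (by omega)
          have := pvF_spec ws
          omega
        rw [hFj]
theorem pvSplit₀_go_ne_nil (s : List Char) :
    ∀ cur acc, (∀ w ∈ acc, w ≠ ([] : List Char)) →
      ∀ w ∈ PySem.Chars.split₀.go s cur acc, w ≠ ([] : List Char) := by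
  induction s with
  | nil =>
    intro cur acc hacc w hw
    rw [PySem.Chars.split₀.go] at hw
    by_cases hc : cur.isEmpty
    · simp [hc] at hw
      exact hacc w hw
    · simp [hc] at hw
      rcases hw with h | h
      · exact hacc w h
      · subst h
        intro he
        rw [List.reverse_eq_nil_iff] at he
        rw [List.isEmpty_iff] at hc
        exact hc he
  | cons c rest ih =>
    intro cur acc hacc w hw
    rw [PySem.Chars.split₀.go] at hw
    by_cases hs : PySem.Chars.isspace c
    · by_cases hc : cur.isEmpty
      · simp [hs, hc] at hw
        exact ih [] acc hacc w hw
      · simp [hs, hc] at hw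
        refine ih [] (cur.reverse :: acc) ?_ w hw
        intro v hv
        rw [List.mem_cons] at hv
        rcases hv with h | h
        · subst h
          intro he
          rw [List.reverse_eq_nil_iff] at he
          rw [List.isEmpty_iff] at hc
          exact hc he
        · exact hacc v h
    · simp [hs] at hw
      exact ih (c :: cur) acc hacc w hw

theorem pvSplit₀_ne_empty (s : String) : ∀ w ∈ PySem.Str.split₀ s, w ≠ "" := by
  intro w hw he
  have hmem : w.toList ∈ (PySem.Str.split₀ s).map String.toList := List.mem_map_of_mem hw
  rw [PySem.Str.split₀_map_toList] at hmem
  have := pvSplit₀_go_ne_nil s.toList [] [] (by intro v hv; simp at hv) w.toList hmem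
  rw [he] at this
  exact this rfl

theorem pvMain_eq (candidate : String) :
    enforce_title_limits candidate = enforce_title_limits_alt candidate := by
  rw [enforce_title_limits, enforce_title_limits_alt]
  by_cases hc : PySem.Str.strip candidate = ""
  · simp [hc]
  · simp only [hc, ite_false]
    have hfilter : (PySem.Str.split₀ (PySem.Str.strip candidate)).filter (fun w => w ≠ "")
        = PySem.Str.split₀ (PySem.Str.strip candidate) := by
      apply List.filter_eq_self.mpr
      intro w hw
      simpa using pvSplit₀_ne_empty _ w hw
    rw [hfilter]
    set ws := PySem.Str.split₀ (PySem.Str.strip candidate) with hws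
    have hA : pvALoop ws [] 0 = ws.take (pvF ws) := by
      have h := pvALoop_eq ws ws.length 0 (by omega) (by omega) (Nat.zero_le _)
      rw [List.drop_zero, List.take_zero, pvJLen_nil] at h
      exact_mod_cast h
    have hB := pvBLoop_eq ws (min 3 ws.length) (min_le_right _ _)
    rw [hA, hB]
    have hFle : pvF ws ≤ ws.length := le_trans (pvF_le ws) (min_le_right _ _)
    by_cases hF : pvF ws = 0
    · rw [show Nat.findGreatest (fun j => pvJLen (ws.take j) ≤ 25) (min 3 ws.length) = pvF ws from rfl, hF]
      simp
    · rw [show Nat.findGreatest (fun j => pvJLen (ws.take j) ≤ 25) (min 3 ws.length) = pvF ws from rfl]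
      have hne : ws.take (pvF ws) ≠ [] := by
        intro h
        rcases List.take_eq_nil_iff.mp h with h' | h'
        · exact hF h'
        · have hl0 : ws.length = 0 := by rw [h']; rfl
          omega
      simp [hF, hne]


-- ===== VERDICT (by name: the statement is the Claim_ definition above) =====
theorem enforce_title_limits_spec : Claim_equal_enforce_title_limits := by
  intro candidate _
  unfold Spec_enforce_title_limits
  exact pvMain_eq candidate
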